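-- pv_equiv track=rewrite | github.com/Doorks-PDS/Dispatch-System | app/services/tech_notes_ingest.py | _pick_notes_column
-- ===== SOURCE A (Python) =====
-- from typing import Optional, List
--
-- def _pick_notes_column(columns: List[str]) -> Optional[str]:
--     """
--     Pick the most likely notes column from a list of column names.
--     Returns the original column name (not lowercased).
--     """
--     exact_priority = [
--         "notes",
--         "note",
--         "tech_notes",
--         "technician_notes",
--         "comments",
--         "comment",
--         "job_notes",
--     ]
--
--     lowered = {str(c).lower().strip(): str(c) for c in columns}
--
--     for key in exact_priority:
--         if key in lowered:
--             return lowered[key]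
--
--     # Anything containing "note"
--     for c in columns:
--         if "note" in str(c).lower():
--             return str(c)
--
--     return None
-- ===== SOURCE B (Python) =====
-- from typing import Optional, List
--
-- _EXACT_PRIORITY = [
--     "notes",
--     "note",
--     "tech_notes",
--     "technician_notes",
--     "comments",
--     "comment",
--     "job_notes",
-- ]
-- _PRIORITY_INDEX = {k: i for i, k in enumerate(_EXACT_PRIORITY)}
--
-- def _pick_notes_column(columns: List[str]) -> Optional[str]:
--     # Single pass: keep the best-ranked exact match; '<=' so a later column with
--     # the same key overrides an earlier one (dict-overwrite semantics of A).
--     best_rank = None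
--     best_col = None
--     for c in columns:
--         r = _PRIORITY_INDEX.get(str(c).lower().strip())
--         if r is not None and (best_rank is None or r <= best_rank):
--             best_rank, best_col = r, str(c)
--     if best_col is not None:
--         return best_col
--     for c in columns:
--         if "note" in str(c).lower():
--             return str(c)
--     return None
-- ===== Notes on version B (the rewrite author's own statement) =====
-- stated objective: alternative
-- what changed: Replaces A's build-a-full-lowered-dict-then-scan-the-priority-list phase by a single pass over the columns that tracks the best-ranked exact match via a precomputed priority->rank index, using a non-strict (<=) update so the last column of the winning key is kept, with the same substring fallback.
import Mathlib
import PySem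

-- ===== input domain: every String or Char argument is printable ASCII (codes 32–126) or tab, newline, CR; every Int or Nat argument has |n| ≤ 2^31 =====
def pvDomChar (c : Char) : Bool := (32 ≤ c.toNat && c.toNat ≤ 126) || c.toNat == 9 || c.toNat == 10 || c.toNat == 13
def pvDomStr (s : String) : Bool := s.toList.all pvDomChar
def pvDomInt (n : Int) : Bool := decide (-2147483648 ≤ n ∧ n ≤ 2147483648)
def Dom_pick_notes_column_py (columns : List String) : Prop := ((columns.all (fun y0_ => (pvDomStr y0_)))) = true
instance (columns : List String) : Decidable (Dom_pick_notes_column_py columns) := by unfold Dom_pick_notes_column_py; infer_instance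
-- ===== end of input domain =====

-- B replaces A's lowered-dict + priority-scan by a single pass tracking the best-ranked
-- exact match (non-strict update, so the last column of the winning key is kept); same
-- substring fallback. Objective: alternative decomposition, same cost.


-- ===== PORT A =====
def pvPriorityA : List String :=
  ["notes", "note", "tech_notes", "technician_notes", "comments", "comment", "job_notes"]

-- str(c).lower().strip()
def pvNormA (c : String) : String := PySem.Str.strip (PySem.Str.lower c)

-- for key in exact_priority: if key in lowered: return lowered[key]
def pvExactLoopA (lowered : PySem.Dict String String) : List String → Option String
  | [] => none
  | k :: rest =>
    match lowered.get? k with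
    | some v => some v
    | none => pvExactLoopA lowered rest

-- for c in columns: if "note" in str(c).lower(): return str(c)
def pvFallbackA : List String → Option String
  | [] => none
  | c :: rest =>
    if PySem.Str.isIn "note" (PySem.Str.lower c) then some c else pvFallbackA rest

def pick_notes_column_py (columns : List String) : Option String :=
  let lowered := columns.foldl (fun d c => d.insert (pvNormA c) c) PySem.Dict.empty
  match pvExactLoopA lowered pvPriorityA with
  | some v => some v
  | none => pvFallbackA columns

-- ===== PORT B =====
def pvPriorityB : List String :=
  ["notes", "note", "tech_notes", "technician_notes", "comments", "comment", "job_notes"]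

-- {k: i for i, k in enumerate(_EXACT_PRIORITY)}
def pvPriorityIndexB : PySem.Dict String Int :=
  PySem.Dict.ofList ((PySem.List.enumerate pvPriorityB).map (fun p => (p.2, p.1)))

-- one iteration of B's single pass (state = (best_rank, best_col))
def pvStepB (st : Option Int × Option String) (c : String) : Option Int × Option String :=
  match pvPriorityIndexB.get? (PySem.Str.strip (PySem.Str.lower c)) with
  | none => st
  | some r =>
    match st.1 with
    | none => (some r, some c)
    | some b => if r ≤ b then (some r, some c) else st

-- for c in columns: if "note" in str(c).lower(): return str(c)
def pvFallbackB : List String → Option String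
  | [] => none
  | c :: rest =>
    if PySem.Str.isIn "note" (PySem.Str.lower c) then some c else pvFallbackB rest

def pick_notes_column_py_alt (columns : List String) : Option String :=
  match (columns.foldl pvStepB (none, none)).2 with
  | some v => some v
  | none => pvFallbackB columns

-- ===== PRECONDITION & SPEC =====
def Spec_pick_notes_column_py (columns : List String) (out : Option String) : Prop := out = pick_notes_column_py_alt columns
instance (columns : List String) (out : Option String) : Decidable (Spec_pick_notes_column_py columns out) := by unfold Spec_pick_notes_column_py; infer_instance

-- ===== CLAIM (what is proved, stated in full; the proofs are below) =====
def Claim_equal_pick_notes_column_py : Prop := ∀ (columns : List String), Dom_pick_notes_column_py columns → Spec_pick_notes_column_py columns (pick_notes_column_py columns)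

-- ===== LEMMAS AND PROOFS =====

-- the j-th priority key
def pvKey (j : Nat) : String := pvPriorityA.getD j ""

-- invariant relating A's growing dict to B's scan state: B's best rank/column is
-- exactly the first priority key present in A's dict, with its (last-written) value
def pvInv (d : PySem.Dict String String) (st : Option Int × Option String) : Prop :=
  (st.1 = none → st.2 = none ∧ ∀ k ∈ pvPriorityA, d.get? k = none) ∧
  (∀ r, st.1 = some r → ∃ j : Nat, j < 7 ∧ r = (j : Int) ∧ d.get? (pvKey j) = st.2 ∧
    st.2 ≠ none ∧ ∀ m, m < j → d.get? (pvKey m) = none)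

lemma pvKey_mem {m : Nat} (h : m < 7) : pvKey m ∈ pvPriorityA := by
  interval_cases m <;> decide

lemma pvKey_inj (m j : Nat) (hm : m < 7) (hj : j < 7) (he : pvKey m = pvKey j) : m = j := by
  interval_cases m <;> interval_cases j <;> revert he <;> decide

lemma pvLookup_key {j : Nat} (h : j < 7) : pvPriorityIndexB.get? (pvKey j) = some (j : Int) := by
  interval_cases j <;> rfl

lemma pvLookup_notmem {n : String} (h : n ∉ pvPriorityA) : pvPriorityIndexB.get? n = none := by
  simp only [pvPriorityA, List.mem_cons, not_or] at h
  obtain ⟨h0, h1, h2, h3, h4, h5, h6, -⟩ := h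
  have hD : pvPriorityIndexB = PySem.Dict.mk
      [("notes", 0), ("note", 1), ("tech_notes", 2), ("technician_notes", 3),
       ("comments", 4), ("comment", 5), ("job_notes", 6)] := by rfl
  rw [hD]
  simp [PySem.Dict.get?, Ne.symm h0, Ne.symm h1, Ne.symm h2, Ne.symm h3,
    Ne.symm h4, Ne.symm h5, Ne.symm h6]

lemma pvGet_insert_key_ne (d : PySem.Dict String String) (v : String) {k n : String}
    (h : k ≠ n) : (d.insert n v).get? k = d.get? k :=
  PySem.Dict.get?_insert_of_ne d v h

lemma pvStep_inv (d : PySem.Dict String String) (st : Option Int × Option String)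
    (c : String) (h : pvInv d st) (st' : Option Int × Option String)
    (hst' : pvStepB st c = st') :
    pvInv (d.insert (pvNormA c) c) st' := by
  unfold pvStepB at hst'
  rw [show PySem.Str.strip (PySem.Str.lower c) = pvNormA c from rfl] at hst'
  obtain ⟨hnone, hsome⟩ := h
  by_cases hmem : pvNormA c ∈ pvPriorityA
  · -- the normalised column is a priority key, say pvKey j
    obtain ⟨j, hj7, hkey⟩ : ∃ j : Nat, j < 7 ∧ pvKey j = pvNormA c := by
      obtain ⟨j, hjlt, hje⟩ := List.mem_iff_getElem.mp hmem
      refine ⟨j, by simpa [pvPriorityA] using hjlt, ?_⟩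
      simp only [pvKey]
      rw [List.getD_eq_getElem?_getD, List.getElem?_eq_getElem hjlt, hje]
      rfl
    have hlook : pvPriorityIndexB.get? (pvNormA c) = some (j : Int) := by
      rw [← hkey]; exact pvLookup_key hj7
    rw [hlook] at hst'
    cases hst1 : st.1 with
    | none =>
      rw [hst1] at hst'
      dsimp only at hst'
      obtain ⟨-, hall⟩ := hnone hst1
      subst hst'
      constructor
      · intro hc; exact absurd hc (by simp)
      · intro r hr
        refine ⟨j, hj7, by simpa using hr.symm, ?_, by simp, ?_⟩
        · rw [hkey]; exact PySem.Dict.get?_insert_self d (pvNormA c) c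
        · intro m hm
          rw [pvGet_insert_key_ne d c (by
            intro he; rw [← hkey] at he
            exact absurd (pvKey_inj m j (by omega) hj7 he) (by omega))]
          exact hall _ (pvKey_mem (by omega))
    | some b =>
      rw [hst1] at hst'
      dsimp only at hst'
      obtain ⟨j0, hj07, hbj0, hget0, hne0, hall0⟩ := hsome b hst1
      by_cases hle : (j : Int) ≤ b
      · rw [if_pos hle] at hst'
        subst hst'
        have hjj0 : j ≤ j0 := by
          have : (j : Int) ≤ (j0 : Int) := by rw [← hbj0]; exact hle
          exact_mod_cast this
        constructor
        · intro hc; exact absurd hc (by simp)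
        · intro r hr
          refine ⟨j, hj7, by simpa using hr.symm, ?_, by simp, ?_⟩
          · rw [hkey]; exact PySem.Dict.get?_insert_self d (pvNormA c) c
          · intro m hm
            rw [pvGet_insert_key_ne d c (by
              intro he; rw [← hkey] at he
              exact absurd (pvKey_inj m j (by omega) hj7 he) (by omega))]
            exact hall0 _ (by omega)
      · rw [if_neg hle] at hst'
        subst hst'
        have hlt : j0 < j := by
          have : ¬ (j : Int) ≤ (j0 : Int) := by rw [← hbj0]; exact hle
          omega
        constructor
        · intro hc; rw [hst1] at hc; exact absurd hc (by simp)
        · intro r hr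
          rw [hst1] at hr
          obtain rfl : b = r := by simpa using hr
          refine ⟨j0, hj07, hbj0, ?_, hne0, ?_⟩
          · rw [pvGet_insert_key_ne d c (by
              intro he; rw [← hkey] at he
              exact absurd (pvKey_inj j0 j hj07 hj7 he) (by omega)), hget0]
          · intro m hm
            rw [pvGet_insert_key_ne d c (by
              intro he; rw [← hkey] at he
              exact absurd (pvKey_inj m j (by omega) hj7 he) (by omega))]
            exact hall0 m hm
  · -- not a priority key: B's state is unchanged and priority lookups are unchanged
    rw [pvLookup_notmem hmem] at hst'
    dsimp only at hst'
    subst hst'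
    have hpres : ∀ k ∈ pvPriorityA, (d.insert (pvNormA c) c).get? k = d.get? k := by
      intro k hk
      exact pvGet_insert_key_ne d c (by rintro rfl; exact hmem hk)
    constructor
    · intro hc
      obtain ⟨hbc, hall⟩ := hnone hc
      exact ⟨hbc, fun k hk => by rw [hpres k hk]; exact hall k hk⟩
    · intro r hr
      obtain ⟨j0, hj07, hbj0, hget0, hne0, hall0⟩ := hsome r hr
      exact ⟨j0, hj07, hbj0, by rw [hpres _ (pvKey_mem hj07)]; exact hget0, hne0,
        fun m hm => by rw [hpres _ (pvKey_mem (by omega))]; exact hall0 m hm⟩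

lemma pvFold_inv (cols : List String) (d : PySem.Dict String String)
    (st : Option Int × Option String) (h : pvInv d st) :
    pvInv (cols.foldl (fun d c => d.insert (pvNormA c) c) d) (cols.foldl pvStepB st) := by
  induction cols generalizing d st with
  | nil => exact h
  | cons c rest ih =>
    simp only [List.foldl_cons]
    exact ih _ _ (pvStep_inv d st c h _ rfl)

lemma pvInv_extract (d : PySem.Dict String String) (st : Option Int × Option String)
    (h : pvInv d st) : pvExactLoopA d pvPriorityA = st.2 := by
  obtain ⟨hnone, hsome⟩ := h
  cases hst : st.1 with
  | none =>
    obtain ⟨hbc, hall⟩ := hnone hst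
    have h0 := hall "notes" (by decide)
    have h1 := hall "note" (by decide)
    have h2 := hall "tech_notes" (by decide)
    have h3 := hall "technician_notes" (by decide)
    have h4 := hall "comments" (by decide)
    have h5 := hall "comment" (by decide)
    have h6 := hall "job_notes" (by decide)
    simp [pvExactLoopA, pvPriorityA, h0, h1, h2, h3, h4, h5, h6, hbc]
  | some b =>
    obtain ⟨j, hj7, -, hget, hne, hall⟩ := hsome b hst
    obtain ⟨v, hv⟩ : ∃ v, st.2 = some v := by
      cases hbc : st.2 with
      | none => exact absurd hbc hne
      | some v => exact ⟨v, rfl⟩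
    rw [hv] at hget ⊢
    interval_cases j
    · have hg : d.get? "notes" = some v := by
        simpa [pvKey, pvPriorityA, List.getD_cons_zero, List.getD_cons_succ] using hget
      simp [pvExactLoopA, pvPriorityA, hg]
    · have e0 : d.get? "notes" = none := by
        have := hall 0 (by omega)
        simpa [pvKey, pvPriorityA, List.getD_cons_zero, List.getD_cons_succ] using this
      have hg : d.get? "note" = some v := by
        simpa [pvKey, pvPriorityA, List.getD_cons_zero, List.getD_cons_succ] using hget
      simp [pvExactLoopA, pvPriorityA, hg, e0]
    · have e0 : d.get? "notes" = none := by
        have := hall 0 (by omega)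
        simpa [pvKey, pvPriorityA, List.getD_cons_zero, List.getD_cons_succ] using this
      have e1 : d.get? "note" = none := by
        have := hall 1 (by omega)
        simpa [pvKey, pvPriorityA, List.getD_cons_zero, List.getD_cons_succ] using this
      have hg : d.get? "tech_notes" = some v := by
        simpa [pvKey, pvPriorityA, List.getD_cons_zero, List.getD_cons_succ] using hget
      simp [pvExactLoopA, pvPriorityA, hg, e0, e1]
    · have e0 : d.get? "notes" = none := by
        have := hall 0 (by omega)
        simpa [pvKey, pvPriorityA, List.getD_cons_zero, List.getD_cons_succ] using this
      have e1 : d.get? "note" = none := by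
        have := hall 1 (by omega)
        simpa [pvKey, pvPriorityA, List.getD_cons_zero, List.getD_cons_succ] using this
      have e2 : d.get? "tech_notes" = none := by
        have := hall 2 (by omega)
        simpa [pvKey, pvPriorityA, List.getD_cons_zero, List.getD_cons_succ] using this
      have hg : d.get? "technician_notes" = some v := by
        simpa [pvKey, pvPriorityA, List.getD_cons_zero, List.getD_cons_succ] using hget
      simp [pvExactLoopA, pvPriorityA, hg, e0, e1, e2]
    · have e0 : d.get? "notes" = none := by
        have := hall 0 (by omega)
        simpa [pvKey, pvPriorityA, List.getD_cons_zero, List.getD_cons_succ] using this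
      have e1 : d.get? "note" = none := by
        have := hall 1 (by omega)
        simpa [pvKey, pvPriorityA, List.getD_cons_zero, List.getD_cons_succ] using this
      have e2 : d.get? "tech_notes" = none := by
        have := hall 2 (by omega)
        simpa [pvKey, pvPriorityA, List.getD_cons_zero, List.getD_cons_succ] using this
      have e3 : d.get? "technician_notes" = none := by
        have := hall 3 (by omega)
        simpa [pvKey, pvPriorityA, List.getD_cons_zero, List.getD_cons_succ] using this
      have hg : d.get? "comments" = some v := by
        simpa [pvKey, pvPriorityA, List.getD_cons_zero, List.getD_cons_succ] using hget
      simp [pvExactLoopA, pvPriorityA, hg, e0, e1, e2, e3]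
    · have e0 : d.get? "notes" = none := by
        have := hall 0 (by omega)
        simpa [pvKey, pvPriorityA, List.getD_cons_zero, List.getD_cons_succ] using this
      have e1 : d.get? "note" = none := by
        have := hall 1 (by omega)
        simpa [pvKey, pvPriorityA, List.getD_cons_zero, List.getD_cons_succ] using this
      have e2 : d.get? "tech_notes" = none := by
        have := hall 2 (by omega)
        simpa [pvKey, pvPriorityA, List.getD_cons_zero, List.getD_cons_succ] using this
      have e3 : d.get? "technician_notes" = none := by
        have := hall 3 (by omega)
        simpa [pvKey, pvPriorityA, List.getD_cons_zero, List.getD_cons_succ] using this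
      have e4 : d.get? "comments" = none := by
        have := hall 4 (by omega)
        simpa [pvKey, pvPriorityA, List.getD_cons_zero, List.getD_cons_succ] using this
      have hg : d.get? "comment" = some v := by
        simpa [pvKey, pvPriorityA, List.getD_cons_zero, List.getD_cons_succ] using hget
      simp [pvExactLoopA, pvPriorityA, hg, e0, e1, e2, e3, e4]
    · have e0 : d.get? "notes" = none := by
        have := hall 0 (by omega)
        simpa [pvKey, pvPriorityA, List.getD_cons_zero, List.getD_cons_succ] using this
      have e1 : d.get? "note" = none := by
        have := hall 1 (by omega)
        simpa [pvKey, pvPriorityA, List.getD_cons_zero, List.getD_cons_succ] using this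
      have e2 : d.get? "tech_notes" = none := by
        have := hall 2 (by omega)
        simpa [pvKey, pvPriorityA, List.getD_cons_zero, List.getD_cons_succ] using this
      have e3 : d.get? "technician_notes" = none := by
        have := hall 3 (by omega)
        simpa [pvKey, pvPriorityA, List.getD_cons_zero, List.getD_cons_succ] using this
      have e4 : d.get? "comments" = none := by
        have := hall 4 (by omega)
        simpa [pvKey, pvPriorityA, List.getD_cons_zero, List.getD_cons_succ] using this
      have e5 : d.get? "comment" = none := by
        have := hall 5 (by omega)
        simpa [pvKey, pvPriorityA, List.getD_cons_zero, List.getD_cons_succ] using this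
      have hg : d.get? "job_notes" = some v := by
        simpa [pvKey, pvPriorityA, List.getD_cons_zero, List.getD_cons_succ] using hget
      simp [pvExactLoopA, pvPriorityA, hg, e0, e1, e2, e3, e4, e5]

lemma pvFallback_eq (cols : List String) : pvFallbackA cols = pvFallbackB cols := by
  induction cols with
  | nil => rfl
  | cons c rest ih => unfold pvFallbackA pvFallbackB; rw [ih]

-- ===== VERDICT (by name: the statement is the Claim_ definition above) =====
theorem pick_notes_column_py_spec : Claim_equal_pick_notes_column_py := by
  intro columns _
  unfold Spec_pick_notes_column_py pick_notes_column_py pick_notes_column_py_alt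
  have hinv : pvInv (columns.foldl (fun d c => d.insert (pvNormA c) c) PySem.Dict.empty)
      (columns.foldl pvStepB (none, none)) := by
    apply pvFold_inv
    refine ⟨fun _ => ⟨rfl, fun k _ => PySem.Dict.get?_empty k⟩, fun r hr => by simp at hr⟩
  have hA := pvInv_extract _ _ hinv
  simp only [hA, pvFallback_eq]
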